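-- pv_equiv track=rewrite | github.com/Jyoti1706/Algortihms-and-Data-Structures | DemoCode.py | solution
-- ===== SOURCE A (Python) =====
-- def capitalize_sentence(sentence):
--     # Ensure the sentence is not empty
--     if not sentence:
--         return sentence
--
--     # Capitalize the first letter of the sentence and convert the rest to lowercase
--     capitalized_sentence = sentence[0].upper() + sentence[1:].lower()
--
--     return capitalized_sentence
--
-- def solution(sentence):
--     sentence = sentence.replace(".", "")
--     words = sentence.split()
--     dic = {}
--     for word in words:
--         n = len(word)
--         try:
--             dic[n].append(word)
--         except:
--             dic[n] = [word, ]
--     keys = list(dic.keys())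
--     keys.sort()
--     output = ""
--     for k in keys:
--         temp = " ".join(dic[k])
--         output = output + temp + " "
--     output = capitalize_sentence(output)
--     output = output.strip() + "."
--     return output
-- ===== SOURCE B (Python) =====
-- def capitalize_sentence(sentence):
--     # Ensure the sentence is not empty
--     if not sentence:
--         return sentence
--     return sentence[0].upper() + sentence[1:].lower()
--
--
-- def solution(sentence):
--     words = sentence.replace(".", "").split()
--     joined = " ".join(sorted(words, key=len))
--     return capitalize_sentence(joined).strip() + "."
-- ===== Notes on version B (the rewrite author's own statement) =====
-- stated objective: simpler
-- what changed: Replaces the length-keyed dict bucketing, key sort and bucket-concatenation loop with a single stable sorted(words, key=len) followed by one join; the dict and both loops disappear.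
import Mathlib
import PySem

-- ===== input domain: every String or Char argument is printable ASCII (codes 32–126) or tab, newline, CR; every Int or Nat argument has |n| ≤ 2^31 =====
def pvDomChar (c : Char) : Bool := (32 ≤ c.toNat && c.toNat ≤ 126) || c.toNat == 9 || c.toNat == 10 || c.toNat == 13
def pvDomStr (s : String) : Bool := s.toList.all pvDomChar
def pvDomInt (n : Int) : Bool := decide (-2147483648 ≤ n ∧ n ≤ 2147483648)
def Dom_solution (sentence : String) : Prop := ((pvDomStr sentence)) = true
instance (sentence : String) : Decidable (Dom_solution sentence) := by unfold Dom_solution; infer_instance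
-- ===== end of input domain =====

-- B replaces A's length-keyed dict bucketing + key sort + bucket-concatenation loop by one
-- stable sort of the words by length and a single join (objective: simpler).

-- ===== PORT A =====
-- helper shared by both Pythons (identical in Source A and Source B)
def capitalize_sentence (sentence : List Char) : List Char :=
  if sentence = [] then sentence
  else PySem.Chars.upper (PySem.List.slice sentence none (some 1)) ++
       PySem.Chars.lower (PySem.List.slice sentence (some 1) none)

def solution (sentence : String) : String :=
  let s := PySem.Chars.replace sentence.toList ['.'] []
  let words := PySem.Chars.split₀ s
  let dic : PySem.Dict Int (List (List Char)) :=
    words.foldl (fun d word =>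
      match d.get? ((word.length : Int)) with
      | some l => d.insert ((word.length : Int)) (l ++ [word])
      | none   => d.insert ((word.length : Int)) [word]) PySem.Dict.empty
  let keys := PySem.List.sorted (PySem.Dict.keys dic) (fun k => k)
  let output := keys.foldl (fun output k =>
      output ++ PySem.Chars.join [' '] (dic.getD k []) ++ [' ']) ([] : List Char)
  let output := capitalize_sentence output
  String.mk (PySem.Chars.strip output ++ ['.'])

-- ===== PORT B =====
def solution_alt (sentence : String) : String :=
  let words := PySem.Chars.split₀ (PySem.Chars.replace sentence.toList ['.'] [])
  let joined := PySem.Chars.join [' ']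
      (PySem.List.sorted words (fun w => ((w.length : Int))))
  String.mk (PySem.Chars.strip (capitalize_sentence joined) ++ ['.'])

-- ===== PRECONDITION & SPEC =====
def Spec_solution (sentence : String) (out : String) : Prop := out = solution_alt sentence
instance (sentence : String) (out : String) : Decidable (Spec_solution sentence out) := by unfold Spec_solution; infer_instance

-- ===== CLAIM (what is proved, stated in full; the proofs are below) =====
def Claim_equal_solution : Prop := ∀ (sentence : String), Dom_solution sentence → Spec_solution sentence (solution sentence)

-- ===== LEMMAS AND PROOFS =====

-- A's bucketing loop body, named for the lemmas below (defeq to the lambda in `solution`)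
def pvStep (d : PySem.Dict Int (List (List Char))) (word : List Char) :
    PySem.Dict Int (List (List Char)) :=
  match d.get? ((word.length : Int)) with
  | some l => d.insert ((word.length : Int)) (l ++ [word])
  | none   => d.insert ((word.length : Int)) [word]

theorem pvStep_eq (d : PySem.Dict Int (List (List Char))) (w : List Char) :
    pvStep d w = d.insert ((w.length : Int)) (d.getD ((w.length : Int)) [] ++ [w]) := by
  unfold pvStep
  rcases hd : d.get? ((w.length : Int)) with _ | l
  · simp [PySem.Dict.getD_of_get?_eq_none d [] hd]
  · simp [PySem.Dict.getD_of_get?_eq_some d [] hd]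

theorem dic_getD (l : List (List Char)) :
    ∀ (d : PySem.Dict Int (List (List Char))) (k : Int),
      (l.foldl pvStep d).getD k []
        = d.getD k [] ++ l.filter (fun w => decide ((w.length : Int) = k)) := by
  induction l with
  | nil => intro d k; simp
  | cons w l ih =>
      intro d k
      simp only [List.foldl_cons, ih, pvStep_eq, PySem.Dict.getD_insert, List.filter_cons]
      by_cases hk : k = ((w.length : Int))
      · simp [hk]
      · have h2 : ¬ ((w.length : Int) = k) := fun h => hk h.symm
        simp [hk, h2]

theorem dic_mem_keys (l : List (List Char)) :
    ∀ (d : PySem.Dict Int (List (List Char))) (k : Int),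
      k ∈ (l.foldl pvStep d).keys ↔
        k ∈ d.keys ∨ k ∈ l.map (fun w => ((w.length : Int))) := by
  induction l with
  | nil => intro d k; simp
  | cons w l ih =>
      intro d k
      simp only [List.foldl_cons, ih, pvStep_eq, PySem.Dict.mem_keys_insert, List.map_cons,
        List.mem_cons]
      tauto

theorem dic_nodup_keys (l : List (List Char)) :
    ∀ (d : PySem.Dict Int (List (List Char))), d.keys.Nodup → (l.foldl pvStep d).keys.Nodup := by
  induction l with
  | nil => intro d h; simpa using h
  | cons w l ih =>
      intro d h
      simp only [List.foldl_cons, pvStep_eq]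
      exact ih _ (PySem.Dict.nodup_keys_insert _ _ _ h)

-- insertBy passes over a block it does not go before
theorem insertBy_append_of_forall_not (before : List Char → List Char → Bool) (x : List Char) :
    ∀ (l rest : List (List Char)), (∀ y ∈ l, before x y = false) →
      PySem.List.insertBy before x (l ++ rest) = l ++ PySem.List.insertBy before x rest := by
  intro l
  induction l with
  | nil => intro rest _; simp
  | cons y l ih =>
      intro rest h
      have hy : before x y = false := h y (by simp)
      simp only [List.cons_append, PySem.List.insertBy, hy]
      simp [ih rest (fun z hz => h z (by simp [hz]))]

theorem insertBy_eq_cons_of_forall (before : List Char → List Char → Bool) (x : List Char)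
    (l : List (List Char)) (h : ∀ y ∈ l, before x y = true) :
    PySem.List.insertBy before x l = x :: l := by
  cases l with
  | nil => rfl
  | cons y l => simp [PySem.List.insertBy, h y (by simp)]

-- inserting x into a concatenation of strictly key-increasing buckets appends x to its bucket
theorem ins_flatMap (x : List Char) :
    ∀ (ks : List Int) (B : Int → List (List Char)),
      ks.Pairwise (· < ·) →
      (∀ k ∈ ks, ∀ y ∈ B k, ((y.length : Int)) = k) →
      ((x.length : Int)) ∈ ks →
      PySem.List.insertBy (fun a b => decide (((a.length : Int)) < ((b.length : Int)))) x
          (ks.flatMap B)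
        = ks.flatMap (fun k => B k ++ if ((x.length : Int)) = k then [x] else []) := by
  intro ks
  induction ks with
  | nil => intro B _ _ hmem; simp at hmem
  | cons k ks ih =>
      intro B hpw hB hmem
      have hlt : ∀ k' ∈ ks, k < k' := (List.pairwise_cons.mp hpw).1
      have hpw' : ks.Pairwise (· < ·) := (List.pairwise_cons.mp hpw).2
      simp only [List.flatMap_cons]
      by_cases hx : ((x.length : Int)) = k
      · have h1 : ∀ y ∈ B k,
            (fun a b => decide (((a.length : Int)) < ((b.length : Int)))) x y = false := by
          intro y hy
          have hk := hB k (by simp) y hy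
          simp only [hk, hx]
          simp
        rw [insertBy_append_of_forall_not _ x (B k) (ks.flatMap B) h1]
        have h2 : ∀ y ∈ ks.flatMap B,
            (fun a b => decide (((a.length : Int)) < ((b.length : Int)))) x y = true := by
          intro y hy
          rcases List.mem_flatMap.mp hy with ⟨k', hk', hyk⟩
          have hk := hB k' (by simp [hk']) y hyk
          have hlt' := hlt k' hk'
          simp only [hk, hx]
          simp
          omega
        rw [insertBy_eq_cons_of_forall _ x (ks.flatMap B) h2]
        have h3 : ks.flatMap (fun k' => B k' ++ if ((x.length : Int)) = k' then [x] else [])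
            = ks.flatMap B := by
          apply List.flatMap_congr
          intro k' hk'
          have hlt' := hlt k' hk'
          have hne : ¬ ((x.length : Int)) = k' := by omega
          simp [hne]
        rw [h3]
        simp [hx]
      · have hxin : ((x.length : Int)) ∈ ks := by
          rcases List.mem_cons.mp hmem with h | h
          · exact absurd h hx
          · exact h
        have h1 : ∀ y ∈ B k,
            (fun a b => decide (((a.length : Int)) < ((b.length : Int)))) x y = false := by
          intro y hy
          have hk := hB k (by simp) y hy
          have hlt' := hlt _ hxin
          simp only [hk]
          simp
          omega
        rw [insertBy_append_of_forall_not _ x (B k) (ks.flatMap B) h1]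
        rw [ih B hpw' (fun k' hk' y hy => hB k' (by simp [hk']) y hy) hxin]
        simp [hx]

-- stability: the stable sort by length is the concatenation of the length buckets
theorem sorted_eq_flatMap_filter :
    ∀ (ws : List (List Char)) (ks : List Int),
      ks.Pairwise (· < ·) →
      (∀ w ∈ ws, ((w.length : Int)) ∈ ks) →
      PySem.List.sorted ws (fun w => ((w.length : Int)))
        = ks.flatMap (fun k => ws.filter (fun w => decide (((w.length : Int)) = k))) := by
  intro ws
  induction ws using List.reverseRecOn with
  | nil => intro ks _ _; simp [PySem.List.sorted_eq_foldl_insertBy]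
  | append_singleton ws w ih =>
      intro ks hpw hmem
      rw [PySem.List.sorted_eq_foldl_insertBy, List.foldl_append, List.foldl_cons, List.foldl_nil,
        ← PySem.List.sorted_eq_foldl_insertBy,
        ih ks hpw (fun w' hw' => hmem w' (by simp [hw']))]
      rw [ins_flatMap w ks _ hpw
        (by intro k hk y hy
            exact of_decide_eq_true (List.mem_filter.mp hy).2)
        (hmem w (by simp))]
      apply List.flatMap_congr
      intro k hk
      rw [List.filter_append]
      simp only [List.filter_cons, List.filter_nil]
      by_cases h : ((w.length : Int)) = k <;> simp [h]

-- joining with a separator distributes over concatenation of nonempty halves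
theorem join_append_ne (sep : List Char) :
    ∀ (L1 L2 : List (List Char)), L1 ≠ [] → L2 ≠ [] →
      PySem.Chars.join sep (L1 ++ L2)
        = PySem.Chars.join sep L1 ++ sep ++ PySem.Chars.join sep L2 := by
  intro L1
  induction L1 with
  | nil => intro L2 h _; exact absurd rfl h
  | cons p L1 ih =>
      intro L2 _ h2
      cases L1 with
      | nil =>
          cases L2 with
          | nil => exact absurd rfl h2
          | cons q rest =>
              simp only [List.nil_append, List.cons_append]
              rw [PySem.Chars.join_cons_cons, PySem.Chars.join_singleton]
      | cons p2 L1' =>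
          have h1' : (p2 :: L1') ≠ ([] : List (List Char)) := by simp
          simp only [List.cons_append]
          rw [PySem.Chars.join_cons_cons, PySem.Chars.join_cons_cons,
            ← List.cons_append, ih L2 h1' h2]
          simp [List.append_assoc]

-- joining nonempty buckets with trailing spaces = join of the concatenation + one trailing space
theorem join_flatMap_trail (B : Int → List (List Char)) :
    ∀ (ks : List Int), ks ≠ [] → (∀ k ∈ ks, B k ≠ []) →
      ks.flatMap (fun k => PySem.Chars.join [' '] (B k) ++ [' '])
        = PySem.Chars.join [' '] (ks.flatMap B) ++ [' '] := by
  intro ks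
  induction ks with
  | nil => intro h _; exact absurd rfl h
  | cons k ks ih =>
      intro _ hne
      cases ks with
      | nil => simp
      | cons k2 ks2 =>
          have hr := ih (by simp) (fun k' hk' => hne k' (by simp [hk']))
          simp only [List.flatMap_cons] at hr ⊢
          rw [hr]
          have hL2 : B k2 ++ List.flatMap B ks2 ≠ [] := by
            have h2 := hne k2 (by simp)
            cases hB2 : B k2 with
            | nil => exact absurd hB2 h2
            | cons a l => simp
          rw [join_append_ne [' '] (B k) (B k2 ++ List.flatMap B ks2) (hne k (by simp)) hL2]
          simp [List.append_assoc]

theorem cap_append_space (x : List Char) :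
    capitalize_sentence (x ++ [' ']) = capitalize_sentence x ++ [' '] := by
  cases x with
  | nil =>
      simp [capitalize_sentence, PySem.List.slice_to _ (by norm_num : (0:Int) ≤ 1),
        PySem.List.slice_from _ (by norm_num : (0:Int) ≤ 1), PySem.Chars.upper,
        PySem.Chars.lower, (by decide : PySem.Chars.upperChar ' ' = ' ')]
  | cons c r =>
      simp [capitalize_sentence, PySem.List.slice_to _ (by norm_num : (0:Int) ≤ 1),
        PySem.List.slice_from _ (by norm_num : (0:Int) ≤ 1), PySem.Chars.upper,
        PySem.Chars.lower, (by decide : PySem.Chars.lowerChar ' ' = ' ')]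

theorem rstrip_append_space (x : List Char) :
    PySem.Chars.rstrip (x ++ [' ']) = PySem.Chars.rstrip x := by
  simp [PySem.Chars.rstrip, List.reverse_append,
    (by decide : PySem.Chars.isspace ' ' = true)]

theorem strip_append_space (x : List Char) :
    PySem.Chars.strip (x ++ [' ']) = PySem.Chars.strip x := by
  unfold PySem.Chars.strip
  unfold PySem.Chars.lstrip
  rw [List.dropWhile_append]
  by_cases h : (List.dropWhile PySem.Chars.isspace x).isEmpty = true
  · have hx : List.dropWhile PySem.Chars.isspace x = [] := by
      simpa [List.isEmpty_iff] using h
    simp [hx, PySem.Chars.rstrip, (by decide : PySem.Chars.isspace ' ' = true)]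
  · simp only [h]
    exact rstrip_append_space _

-- ===== VERDICT (by name: the statement is the Claim_ definition above) =====
theorem solution_spec : Claim_equal_solution := by
  intro sentence _
  unfold Spec_solution solution solution_alt
  simp only []
  set words := PySem.Chars.split₀ (PySem.Chars.replace sentence.toList ['.'] []) with hw
  have hfold : words.foldl (fun d word =>
      match d.get? ((word.length : Int)) with
      | some l => d.insert ((word.length : Int)) (l ++ [word])
      | none   => d.insert ((word.length : Int)) [word]) PySem.Dict.empty
      = words.foldl pvStep PySem.Dict.empty := rfl
  rw [hfold]
  set dic := words.foldl pvStep PySem.Dict.empty with hdic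
  set ks := PySem.List.sorted dic.keys (fun k => k) with hks
  have hgetD : ∀ k : Int, dic.getD k []
      = words.filter (fun w => decide (((w.length : Int)) = k)) := by
    intro k
    rw [hdic, dic_getD]
    simp
  have hnodup : dic.keys.Nodup := dic_nodup_keys _ _ (PySem.Dict.nodup_keys_empty)
  have hmemk : ∀ k : Int, k ∈ dic.keys ↔ k ∈ words.map (fun w => ((w.length : Int))) := by
    intro k
    rw [hdic, dic_mem_keys]
    simp
  have hkpw : ks.Pairwise (· < ·) := by
    have h1 := PySem.List.sorted_pairwise dic.keys (fun k => k)
    have h2 : ks.Nodup :=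
      ((PySem.List.sorted_perm dic.keys (fun k => k) false).nodup_iff).mpr hnodup
    exact (h1.and h2).imp (fun hab => lt_of_le_of_ne hab.1 hab.2)
  have hwmem : ∀ w ∈ words, ((w.length : Int)) ∈ ks := by
    intro w hw'
    rw [hks, PySem.List.mem_sorted]
    exact (hmemk _).mpr (List.mem_map.mpr ⟨w, hw', rfl⟩)
  have hout : ks.foldl (fun output k =>
        output ++ PySem.Chars.join [' '] (dic.getD k []) ++ [' ']) ([] : List Char)
      = ks.flatMap (fun k => PySem.Chars.join [' '] (dic.getD k []) ++ [' ']) := by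
    simp only [List.append_assoc]
    simpa using PySem.List.foldl_append_eq_flatMap
      (fun k => PySem.Chars.join [' '] (dic.getD k []) ++ [' ']) ks []
  have hsorted := sorted_eq_flatMap_filter words ks hkpw hwmem
  rw [hout]
  cases hksnil : ks with
  | nil =>
      rw [hksnil] at hsorted
      simp only [List.flatMap_nil] at hsorted ⊢
      rw [hsorted, PySem.Chars.join_nil]
  | cons k0 ks0 =>
      have hksne : ks ≠ [] := by rw [hksnil]; simp
      have hbne : ∀ k ∈ ks, dic.getD k [] ≠ [] := by
        intro k hk
        rw [hgetD]
        have hk' : k ∈ dic.keys := by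
          have := (PySem.List.mem_sorted dic.keys (fun k => k) false k).mp (hks ▸ hk)
          exact this
        rcases List.mem_map.mp ((hmemk k).mp hk') with ⟨w, hw', hwk⟩
        have : w ∈ words.filter (fun w => decide (((w.length : Int)) = k)) :=
          List.mem_filter.mpr ⟨hw', by simp [hwk]⟩
        exact List.ne_nil_of_mem this
      rw [← hksnil]
      have hflat : ks.flatMap (fun k => PySem.Chars.join [' '] (dic.getD k []) ++ [' '])
          = PySem.Chars.join [' '] (ks.flatMap (fun k => dic.getD k [])) ++ [' '] :=
        join_flatMap_trail (fun k => dic.getD k []) ks hksne hbne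
      rw [hflat]
      have hS : ks.flatMap (fun k => dic.getD k [])
          = PySem.List.sorted words (fun w => ((w.length : Int))) := by
        rw [hsorted]
        apply List.flatMap_congr
        intro k _
        exact hgetD k
      rw [hS, cap_append_space, strip_append_space]
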